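-- pv_equiv track=rewrite | github.com/GDelvoye/pegase_metacom | package_thierache/analyse_resultat.py | ana_beta_pairVRAI
-- ===== SOURCE A (Python) =====
-- def richesse_commu(compo,ind_disp=[]):
--     R=0
--     for i in range(0,len(compo)):
--         if ind_disp == []:
--             if compo[i]>0:
--                 R+=1
--         else:
--             if (i in ind_disp) and compo[i]>0:
--                 R+=1
--     #for j in compo:
--      #   if j >0.:
--       #      R+=1
--     return R
--
-- def ana_beta_pairVRAI(c1,c2):
--     R1 = richesse_commu(c1)
--     R2 = richesse_commu(c2)
--     a,b,c = 0, 0, 0#commun, unique pauvre, unique riche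
--     for i in range(0,len(c1)):
--         if c1[i]>0:
--             if c2[i]>0:
--                 a+=1
--             else: #1 oui, 2 non
--                 b+=1
--         elif c2[i]>0:#2 oui, 1 non
--                 c+=1
--     return a, b, c
-- ===== SOURCE B (Python) =====
-- def ana_beta_pairVRAI(c1, c2):
--     s1 = {i for i in range(len(c1)) if c1[i] > 0}
--     s2 = {i for i in range(len(c1)) if c2[i] > 0}
--     return len(s1 & s2), len(s1 - s2), len(s2 - s1)
-- ===== Notes on version B (the rewrite author's own statement) =====
-- stated objective: idiomatic
-- what changed: Replaces the single branching counting loop (and the two dead richness computations) by building two sets of positive-value indices and returning the sizes of their intersection and two differences via set algebra.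
import Mathlib
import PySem

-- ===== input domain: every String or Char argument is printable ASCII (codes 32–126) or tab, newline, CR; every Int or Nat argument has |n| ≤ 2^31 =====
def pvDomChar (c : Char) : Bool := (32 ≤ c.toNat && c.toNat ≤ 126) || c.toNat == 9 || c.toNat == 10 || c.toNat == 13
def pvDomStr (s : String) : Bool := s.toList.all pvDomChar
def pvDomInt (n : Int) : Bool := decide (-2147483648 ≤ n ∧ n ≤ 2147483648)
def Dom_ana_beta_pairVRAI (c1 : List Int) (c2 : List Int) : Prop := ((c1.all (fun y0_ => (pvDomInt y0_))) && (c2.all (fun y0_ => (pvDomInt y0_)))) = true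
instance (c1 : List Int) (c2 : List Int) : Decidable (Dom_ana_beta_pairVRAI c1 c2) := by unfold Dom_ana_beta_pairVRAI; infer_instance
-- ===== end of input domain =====

-- B replaces A's branching counting loop by set algebra on two sets of positive-value indices (idiomatic; same cost; return value only, neither mutates).

-- ===== PORT A =====
-- port of richesse_commu (called with default ind_disp = [])
def richesse_commu (compo : List Int) (ind_disp : List Int) : Int :=
  (PySem.List.pyRange 0 (compo.length) 1).foldl
    (fun R i =>
      if ind_disp = [] then
        if PySem.List.pyGetD compo i 0 > 0 then R + 1 else R
      else
        if i ∈ ind_disp ∧ PySem.List.pyGetD compo i 0 > 0 then R + 1 else R)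
    0

def ana_beta_pairVRAI (c1 : List Int) (c2 : List Int) : Int × Int × Int :=
  let _R1 := richesse_commu c1 []
  let _R2 := richesse_commu c2 []
  (PySem.List.pyRange 0 (c1.length) 1).foldl
    (fun (s : Int × Int × Int) i =>
      if PySem.List.pyGetD c1 i 0 > 0 then
        if PySem.List.pyGetD c2 i 0 > 0 then (s.1 + 1, s.2.1, s.2.2)
        else (s.1, s.2.1 + 1, s.2.2)
      else if PySem.List.pyGetD c2 i 0 > 0 then (s.1, s.2.1, s.2.2 + 1)
      else s)
    (0, 0, 0)

-- ===== PORT B =====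
def ana_beta_pairVRAI_alt (c1 : List Int) (c2 : List Int) : Int × Int × Int :=
  let s1 : PySem.Set Int :=
    PySem.Set.ofList ((PySem.List.pyRange 0 (c1.length) 1).filter (fun i => PySem.List.pyGetD c1 i 0 > 0))
  let s2 : PySem.Set Int :=
    PySem.Set.ofList ((PySem.List.pyRange 0 (c1.length) 1).filter (fun i => PySem.List.pyGetD c2 i 0 > 0))
  (((PySem.Set.inter s1 s2).length : Int), ((PySem.Set.diff s1 s2).length : Int), ((PySem.Set.diff s2 s1).length : Int))

-- ===== PRECONDITION & SPEC =====
-- Pre_ excludes exactly the inputs where A raises IndexError (c2 shorter than c1; A reads c2[i] for every i < len(c1)); B raises there too.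
def Pre_ana_beta_pairVRAI (c1 : List Int) (c2 : List Int) : Prop := c1.length ≤ c2.length
instance (c1 : List Int) (c2 : List Int) : Decidable (Pre_ana_beta_pairVRAI c1 c2) := by unfold Pre_ana_beta_pairVRAI; infer_instance
def pvWitness_ana_beta_pairVRAI : List Int × List Int := ([1, 0, 2, -1], [0, 3, 1, 2])

def Spec_ana_beta_pairVRAI (c1 : List Int) (c2 : List Int) (out : Int × Int × Int) : Prop := out = ana_beta_pairVRAI_alt c1 c2
instance (c1 : List Int) (c2 : List Int) (out : Int × Int × Int) : Decidable (Spec_ana_beta_pairVRAI c1 c2 out) := by unfold Spec_ana_beta_pairVRAI; infer_instance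

-- ===== CLAIM (what is proved, stated in full; the proofs are below) =====
def Claim_equal_ana_beta_pairVRAI : Prop := ∀ (c1 : List Int) (c2 : List Int), Dom_ana_beta_pairVRAI c1 c2 → Pre_ana_beta_pairVRAI c1 c2 → Spec_ana_beta_pairVRAI c1 c2 (ana_beta_pairVRAI c1 c2)

-- ===== LEMMAS AND PROOFS =====


-- A's loop with three independent counters, characterised by countP
theorem foldl_triple_count (P Q : Int → Prop) [DecidablePred P] [DecidablePred Q]
    (l : List Int) (a b c : Int) :
    l.foldl
      (fun (s : Int × Int × Int) i =>
        if P i then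
          if Q i then (s.1 + 1, s.2.1, s.2.2)
          else (s.1, s.2.1 + 1, s.2.2)
        else if Q i then (s.1, s.2.1, s.2.2 + 1)
        else s)
      (a, b, c)
    = (a + (l.countP (fun i => decide (P i) && decide (Q i)) : Int),
       b + (l.countP (fun i => decide (P i) && !decide (Q i)) : Int),
       c + (l.countP (fun i => !decide (P i) && decide (Q i)) : Int)) := by
  induction l generalizing a b c with
  | nil => simp
  | cons x xs ih =>
    simp only [List.foldl_cons, List.countP_cons]
    by_cases hP : P x <;> by_cases hQ : Q x <;>
      simp [hP, hQ, ih, Prod.ext_iff] <;> omega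

-- the size of s1 & s2 (both index sets over the same base list r) is a countP over r
theorem inter_len (P Q : Int → Prop) [DecidablePred P] [DecidablePred Q] (r : List Int) :
    (PySem.Set.inter (r.filter (fun i => decide (P i))) (r.filter (fun i => decide (Q i)))).length
      = r.countP (fun i => decide (P i) && decide (Q i)) := by
  show ((r.filter (fun i => decide (P i))).filter
      (fun x => PySem.Set.contains (r.filter (fun i => decide (Q i))) x)).length = _
  rw [List.filter_filter]
  rw [List.filter_congr (q := fun i => decide (P i) && decide (Q i)) ?_]
  · exact (List.countP_eq_length_filter ..).symm
  · intro x hx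
    simp [PySem.Set.contains, List.mem_filter, hx, Bool.and_comm]

-- the size of s1 - s2 is the countP of "P and not Q" over r
theorem diff_len (P Q : Int → Prop) [DecidablePred P] [DecidablePred Q] (r : List Int) :
    (PySem.Set.diff (r.filter (fun i => decide (P i))) (r.filter (fun i => decide (Q i)))).length
      = r.countP (fun i => decide (P i) && !decide (Q i)) := by
  show ((r.filter (fun i => decide (P i))).filter
      (fun x => !PySem.Set.contains (r.filter (fun i => decide (Q i))) x)).length = _
  rw [List.filter_filter]
  rw [List.filter_congr (q := fun i => decide (P i) && !decide (Q i)) ?_]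
  · exact (List.countP_eq_length_filter ..).symm
  · intro x hx
    simp [PySem.Set.contains, List.mem_filter, hx, Bool.and_comm]

-- ===== VERDICT (by name: the statement is the Claim_ definition above) =====
theorem ana_beta_pairVRAI_spec : Claim_equal_ana_beta_pairVRAI := by
  intro c1 c2 _ _
  unfold Spec_ana_beta_pairVRAI ana_beta_pairVRAI ana_beta_pairVRAI_alt
  show (PySem.List.pyRange 0 (c1.length) 1).foldl
      (fun (s : Int × Int × Int) i =>
        if PySem.List.pyGetD c1 i 0 > 0 then
          if PySem.List.pyGetD c2 i 0 > 0 then (s.1 + 1, s.2.1, s.2.2)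
          else (s.1, s.2.1 + 1, s.2.2)
        else if PySem.List.pyGetD c2 i 0 > 0 then (s.1, s.2.1, s.2.2 + 1)
        else s)
      (0, 0, 0)
    = (((PySem.Set.inter
          (PySem.Set.ofList ((PySem.List.pyRange 0 (c1.length) 1).filter (fun i => decide (PySem.List.pyGetD c1 i 0 > 0))))
          (PySem.Set.ofList ((PySem.List.pyRange 0 (c1.length) 1).filter (fun i => decide (PySem.List.pyGetD c2 i 0 > 0))))).length : Int),
       ((PySem.Set.diff
          (PySem.Set.ofList ((PySem.List.pyRange 0 (c1.length) 1).filter (fun i => decide (PySem.List.pyGetD c1 i 0 > 0))))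
          (PySem.Set.ofList ((PySem.List.pyRange 0 (c1.length) 1).filter (fun i => decide (PySem.List.pyGetD c2 i 0 > 0))))).length : Int),
       ((PySem.Set.diff
          (PySem.Set.ofList ((PySem.List.pyRange 0 (c1.length) 1).filter (fun i => decide (PySem.List.pyGetD c2 i 0 > 0))))
          (PySem.Set.ofList ((PySem.List.pyRange 0 (c1.length) 1).filter (fun i => decide (PySem.List.pyGetD c1 i 0 > 0))))).length : Int))
  rw [foldl_triple_count (fun i => PySem.List.pyGetD c1 i 0 > 0) (fun i => PySem.List.pyGetD c2 i 0 > 0)]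
  rw [PySem.Set.ofList_eq_self_of_nodup _ (List.Nodup.filter _ (PySem.List.nodup_pyRange_one 0 (c1.length))),
      PySem.Set.ofList_eq_self_of_nodup _ (List.Nodup.filter _ (PySem.List.nodup_pyRange_one 0 (c1.length)))]
  rw [inter_len (fun i => PySem.List.pyGetD c1 i 0 > 0) (fun i => PySem.List.pyGetD c2 i 0 > 0),
      diff_len (fun i => PySem.List.pyGetD c1 i 0 > 0) (fun i => PySem.List.pyGetD c2 i 0 > 0),
      diff_len (fun i => PySem.List.pyGetD c2 i 0 > 0) (fun i => PySem.List.pyGetD c1 i 0 > 0)]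
  simp [Bool.and_comm]
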